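-- pv_equiv track=rewrite | github.com/memoflora/advent-of-code | 2025/day02/part2.py | get
-- ===== SOURCE A (Python) =====
-- def get(sz, l, r):
--     cnt, ret = {}, 0
--     for seq in range(1, sz // 2 + 1):
--         if sz % seq != 0: continue
--
--         rep, fac = sz // seq, 1
--         for i in range(rep - 1):
--             fac = fac * (10 ** seq) + 1
--
--         lf = (l + fac - 1) // fac
--         rg = r // fac
--         tmp = fac * (lf + rg) * (rg - lf + 1) // 2
--
--         for k, v in cnt.items():
--             if seq % k == 0:
--                 ret -= v
--
--         cnt[seq] = tmp
--         ret += cnt[seq]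
--
--     return ret
-- ===== SOURCE B (Python) =====
-- def get(sz, l, r):
--     if sz < 2:
--         return 0
--     divs = [d for d in range(1, sz // 2 + 1) if sz % d == 0]
--     big = 10 ** sz - 1
--     total = 0
--     for seq in divs:
--         fac = big // (10 ** seq - 1)
--         lf = (l + fac - 1) // fac
--         rg = r // fac
--         tmp = fac * (lf + rg) * (rg - lf + 1) // 2
--         mult = sum(1 for m in divs if m != seq and m % seq == 0)
--         total += (1 - mult) * tmp
--     return total
-- ===== Notes on version B (the rewrite author's own statement) =====
-- stated objective: faster
-- what changed: B computes each fac in closed form as (10^sz-1)//(10^seq-1) instead of A's rep-1 big-integer multiply-add loop, and replaces A's incrementally maintained inclusion-exclusion dict by a directly counted coefficient (1 - number of larger divisor multiples) per divisor.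
import Mathlib
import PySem

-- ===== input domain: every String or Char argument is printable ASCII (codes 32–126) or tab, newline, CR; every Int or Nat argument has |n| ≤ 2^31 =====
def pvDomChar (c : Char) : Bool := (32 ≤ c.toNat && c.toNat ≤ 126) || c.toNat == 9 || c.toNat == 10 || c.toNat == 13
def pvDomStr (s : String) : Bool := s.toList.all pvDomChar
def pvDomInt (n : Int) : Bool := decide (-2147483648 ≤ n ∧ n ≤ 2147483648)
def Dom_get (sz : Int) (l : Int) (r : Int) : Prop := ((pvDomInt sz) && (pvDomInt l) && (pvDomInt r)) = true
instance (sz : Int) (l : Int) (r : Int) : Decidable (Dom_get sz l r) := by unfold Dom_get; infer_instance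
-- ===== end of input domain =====

-- B replaces A's iterative repunit construction and inclusion-exclusion dict with a
-- closed-form fac = (10^sz-1)/(10^seq-1) and a directly counted coefficient per divisor.

-- ===== PORT A =====
-- inner loop 'for i in range(rep-1): fac = fac*(10**seq)+1'; seq ≥ 1 inside the loop, so 10**seq = 10 ^ seq.toNat exactly
def facA (sz : Int) (seq : Int) : Int :=
  (PySem.List.pyRange 0 (PySem.Int.floordiv sz seq - 1) 1).foldl
    (fun fac _ => fac * 10 ^ seq.toNat + 1) 1

def tmpA (sz : Int) (l : Int) (r : Int) (seq : Int) : Int :=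
  let fac := facA sz seq
  let lf := PySem.Int.floordiv (l + fac - 1) fac
  let rg := PySem.Int.floordiv r fac
  PySem.Int.floordiv (fac * (lf + rg) * (rg - lf + 1)) 2

def bodyA (sz : Int) (l : Int) (r : Int) (st : PySem.Dict Int Int × Int) (seq : Int) :
    PySem.Dict Int Int × Int :=
  if PySem.Int.mod sz seq ≠ 0 then st
  else
    let tmp := tmpA sz l r seq
    let ret := st.1.items.foldl
      (fun ret kv => if PySem.Int.mod seq kv.1 = 0 then ret - kv.2 else ret) st.2
    let cnt := st.1.insert seq tmp
    (cnt, ret + cnt.getD seq 0)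

def get (sz : Int) (l : Int) (r : Int) : Int :=
  ((PySem.List.pyRange 1 (PySem.Int.floordiv sz 2 + 1) 1).foldl (bodyA sz l r)
    (PySem.Dict.empty, 0)).2

-- ===== PORT B =====
-- fac = big // (10**seq - 1); seq ≥ 1 and (after the sz < 2 guard) sz ≥ 2, so ** = ^ toNat exactly
def tmpB (big : Int) (l : Int) (r : Int) (seq : Int) : Int :=
  let fac := PySem.Int.floordiv big (10 ^ seq.toNat - 1)
  let lf := PySem.Int.floordiv (l + fac - 1) fac
  let rg := PySem.Int.floordiv r fac
  PySem.Int.floordiv (fac * (lf + rg) * (rg - lf + 1)) 2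

def get_alt (sz : Int) (l : Int) (r : Int) : Int :=
  if sz < 2 then 0
  else
    let divs := (PySem.List.pyRange 1 (PySem.Int.floordiv sz 2 + 1) 1).filter
      (fun d => PySem.Int.mod sz d == 0)
    let big := 10 ^ sz.toNat - 1
    divs.foldl
      (fun total seq =>
        let mult : Int := (divs.countP (fun m => m != seq && PySem.Int.mod m seq == 0) : Int)
        total + (1 - mult) * tmpB big l r seq) 0

-- ===== PRECONDITION & SPEC =====
def Spec_get (sz : Int) (l : Int) (r : Int) (out : Int) : Prop := out = get_alt sz l r
instance (sz : Int) (l : Int) (r : Int) (out : Int) : Decidable (Spec_get sz l r out) := by unfold Spec_get; infer_instance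

-- ===== CLAIM (what is proved, stated in full; the proofs are below) =====
def Claim_equal_get : Prop := ∀ (sz : Int) (l : Int) (r : Int), Dom_get sz l r → Spec_get sz l r (get sz l r)

-- ===== LEMMAS AND PROOFS =====

-- the symbolic value of A's ret accumulator: for each processed divisor s, A adds tmp s and
-- subtracts tmp k for every previously processed k with s % k == 0
def retSum (T : Int → Int) : List Int → List Int → Int
  | _, [] => 0
  | prev, s :: L =>
      (T s - ((prev.filter (fun k => decide (PySem.Int.mod s k = 0))).map T).sum)
        + retSum T (prev ++ [s]) L

theorem get_trivial_of_lt_two (sz l r : Int) (h : sz < 2) : get sz l r = 0 := by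
  have h2 : PySem.Int.floordiv sz 2 < 1 := by
    rw [PySem.Int.floordiv_lt_iff_lt_mul (by norm_num)]; omega
  show ((PySem.List.pyRange 1 (PySem.Int.floordiv sz 2 + 1) 1).foldl (bodyA sz l r)
    (PySem.Dict.empty, 0)).2 = 0
  rw [PySem.List.pyRange_one_eq_nil (by omega)]
  rfl

theorem geo_fold (p : Int) : ∀ (K : Nat) (x : Int),
    (List.range K).foldl (fun f _ => f * p + 1) x
      = x * p ^ K + ∑ i ∈ Finset.range K, p ^ i := by
  intro K
  induction K with
  | zero => intro x; simp
  | succ K ih =>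
      intro x
      rw [List.range_succ, List.foldl_append, ih]
      simp only [List.foldl_cons, List.foldl_nil]
      rw [Finset.sum_range_succ']
      simp only [pow_succ', pow_zero]
      rw [← Finset.mul_sum]
      ring

theorem facA_closed (sz seq : Int) (h1 : 1 ≤ seq) (h2 : 2 ≤ sz)
    (hdvd : PySem.Int.mod sz seq = 0) :
    facA sz seq = PySem.Int.floordiv (10 ^ sz.toNat - 1) (10 ^ seq.toNat - 1) := by
  have hdvd' : seq ∣ sz := (PySem.Int.mod_eq_zero_iff_dvd sz seq).mp hdvd
  have hrepdef : PySem.Int.floordiv sz seq = sz / seq :=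
    PySem.Int.floordiv_eq_ediv_of_pos (by omega)
  set rep : Int := sz / seq with hrep
  have hrepmul : rep * seq = sz := Int.ediv_mul_cancel hdvd'
  have hrep1 : 1 ≤ rep := by nlinarith [Int.le_of_dvd (by omega) hdvd']
  have hp : (10:ℤ) ^ (1:ℕ) ≤ 10 ^ seq.toNat := by
    apply pow_le_pow_right₀ (by norm_num); omega
  have hp' : (2:ℤ) ≤ 10 ^ seq.toNat := by simpa using hp.trans' (by norm_num)
  have hfold : facA sz seq
      = (10 ^ seq.toNat) ^ ((rep - 1).toNat)
        + ∑ i ∈ Finset.range ((rep - 1).toNat), (10 ^ seq.toNat : Int) ^ i := by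
    unfold facA
    rw [hrepdef, PySem.List.pyRange_one, List.foldl_map, geo_fold]
    simp
  have hK : (rep - 1).toNat + 1 = rep.toNat := by omega
  have hsum : facA sz seq
      = ∑ i ∈ Finset.range (rep.toNat), (10 ^ seq.toNat : Int) ^ i := by
    rw [← hK, Finset.sum_range_succ, hfold]; ring
  have e1 : (rep.toNat : Int) = rep := Int.toNat_of_nonneg (by omega)
  have e2 : (seq.toNat : Int) = seq := Int.toNat_of_nonneg (by omega)
  have e3 : (sz.toNat : Int) = sz := Int.toNat_of_nonneg (by omega)
  have hexp : seq.toNat * rep.toNat = sz.toNat := by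
    have hc : ((seq.toNat * rep.toNat : Nat) : Int) = ((sz.toNat : Nat) : Int) := by
      push_cast
      rw [e1, e2, e3]
      linarith [hrepmul]
    exact_mod_cast hc
  have hgeom : (∑ i ∈ Finset.range (rep.toNat), (10 ^ seq.toNat : Int) ^ i)
      * (10 ^ seq.toNat - 1) = 10 ^ sz.toNat - 1 := by
    rw [geom_sum_mul, ← pow_mul, hexp]
  rw [hsum, PySem.Int.floordiv_eq_ediv_of_pos (by omega), ← hgeom,
    Int.mul_ediv_cancel _ (by omega)]

-- A's ret-subtraction loop over the dict items, in closed form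
theorem sub_fold (s : Int) : ∀ (items : List (Int × Int)) (a : Int),
    items.foldl (fun ret kv => if PySem.Int.mod s kv.1 = 0 then ret - kv.2 else ret) a
      = a - ((items.filter (fun kv => decide (PySem.Int.mod s kv.1 = 0))).map Prod.snd).sum := by
  intro items
  induction items with
  | nil => intro a; simp
  | cons kv t ih =>
      intro a
      by_cases h : PySem.Int.mod s kv.1 = 0 <;> simp [h, ih] <;> ring

-- A's divisor loop, symbolically
theorem loopA (sz l r : Int) : ∀ (L prev : List Int) (ret : Int),
    (prev ++ L).Nodup →
    (∀ x ∈ L, PySem.Int.mod sz x = 0) →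
    (L.foldl (bodyA sz l r)
        (PySem.Dict.mk (prev.map (fun t => (t, tmpA sz l r t))), ret)).2
      = ret + retSum (tmpA sz l r) prev L := by
  intro L
  induction L with
  | nil => intro prev ret _ _; simp [retSum]
  | cons s L ih =>
      intro prev ret hnd hP
      have hmod : PySem.Int.mod sz s = 0 := hP s (by simp)
      obtain ⟨hnd1, hnd2, hdisj⟩ := List.nodup_append.mp hnd
      have hsnot : s ∉ prev := fun hmem => (hdisj s hmem s (by simp)) rfl
      have hcont : (PySem.Dict.mk (prev.map (fun t => (t, tmpA sz l r t)))).contains s = false := by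
        rw [PySem.Dict.contains_eq_decide_mem_keys]
        simp [hsnot]
      have hitems : ((PySem.Dict.mk (prev.map (fun t => (t, tmpA sz l r t)))).insert s
            (tmpA sz l r s)).items
          = (prev ++ [s]).map (fun t => (t, tmpA sz l r t)) := by
        rw [PySem.Dict.items_insert, hcont]
        simp
      have hins : ((PySem.Dict.mk (prev.map (fun t => (t, tmpA sz l r t)))).insert s
            (tmpA sz l r s))
          = PySem.Dict.mk ((prev ++ [s]).map (fun t => (t, tmpA sz l r t))) :=
        congrArg PySem.Dict.mk hitems
      have hb : bodyA sz l r (PySem.Dict.mk (prev.map (fun t => (t, tmpA sz l r t))), ret) s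
          = (PySem.Dict.mk ((prev ++ [s]).map (fun t => (t, tmpA sz l r t))),
             (ret - ((prev.filter (fun k => decide (PySem.Int.mod s k = 0))).map
                (tmpA sz l r)).sum) + tmpA sz l r s) := by
        unfold bodyA
        rw [if_neg (by simp [hmod])]
        rw [Prod.mk.injEq]
        refine ⟨hins, ?_⟩
        rw [PySem.Dict.getD_insert_self]
        congr 1
        show ((prev.map (fun t => (t, tmpA sz l r t))).foldl
            (fun ret kv => if PySem.Int.mod s kv.1 = 0 then ret - kv.2 else ret) ret) = _
        rw [sub_fold]
        congr 1
        congr 1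
        rw [List.filter_map, List.map_map]
        rfl
      rw [List.foldl_cons, hb,
        ih (prev ++ [s]) _ (by simpa using hnd) (fun x hx => hP x (by simp [hx]))]
      show _ = ret + retSum (tmpA sz l r) prev (s :: L)
      simp only [retSum]
      ring

-- retSum in closed form over a strictly increasing list
theorem retSum_closed (T : Int → Int) : ∀ (L prev : List Int),
    (prev ++ L).Pairwise (· < ·) →
    retSum T prev L
      = (L.map (fun s => T s -
          (((prev ++ L).filter (fun k => decide (PySem.Int.mod s k = 0 ∧ k < s))).map T).sum)).sum := by
  intro L
  induction L with
  | nil => intro prev _; simp [retSum]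
  | cons s L ih =>
      intro prev hpw
      have hpw' : ((prev ++ [s]) ++ L).Pairwise (· < ·) := by
        simpa [List.append_assoc] using hpw
      obtain ⟨hp1, hp2, hcross⟩ := List.pairwise_append.mp hpw
      have hklt : ∀ k ∈ prev, k < s := fun k hk => hcross k hk s (by simp)
      have hLgt : ∀ b ∈ L, s < b := (List.pairwise_cons.mp hp2).1
      simp only [retSum]
      rw [ih (prev ++ [s]) hpw']
      simp only [List.map_cons, List.sum_cons, List.append_assoc, List.singleton_append]
      congr 2
      rw [List.filter_append, List.filter_cons]
      have h0 : (decide (PySem.Int.mod s s = 0 ∧ s < s)) = false := by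
        simp only [decide_eq_false_iff_not, not_and]
        intro _
        omega
      rw [h0]
      have h2 : L.filter (fun k => decide (PySem.Int.mod s k = 0 ∧ k < s)) = [] :=
        List.filter_eq_nil_iff.mpr (fun a ha => by
          have hgt := hLgt a ha
          simp only [decide_eq_true_eq, not_and]
          intro _
          omega)
      rw [h2]
      have h3 : prev.filter (fun k => decide (PySem.Int.mod s k = 0))
          = prev.filter (fun k => decide (PySem.Int.mod s k = 0 ∧ k < s)) := by
        apply List.filter_congr
        intro k hk
        have := hklt k hk
        simp [this]
      rw [h3]
      simp

-- Fubini: A's "subtract earlier divisors' tmp" equals B's "count later multiples" coefficient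
theorem sum_swap_list (T : Int → Int) (D : List Int)
    (hpw : D.Pairwise (· < ·)) (hpos : ∀ x ∈ D, 1 ≤ x) :
    (D.map (fun s => T s -
        ((D.filter (fun k => decide (PySem.Int.mod s k = 0 ∧ k < s))).map T).sum)).sum
    = (D.map (fun s =>
        (1 - (D.countP (fun m => m != s && PySem.Int.mod m s == 0) : Int)) * T s)).sum := by
  classical
  have hnd : D.Nodup := hpw.imp (fun h => ne_of_lt h)
  have hposF : ∀ x ∈ D.toFinset, 1 ≤ x := by
    intro x hx; exact hpos x (List.mem_toFinset.mp hx)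
  -- inner filtered list sums as Finset sums
  have hfilt : ∀ (p : Int → Bool),
      ((D.filter p).map T).sum = ∑ k ∈ D.toFinset.filter (fun k => p k = true), T k := by
    intro p
    rw [← List.sum_toFinset T (hnd.filter p), List.toFinset_filter]
  have hcnt : ∀ (p : Int → Bool),
      (D.countP p) = (D.toFinset.filter (fun k => p k = true)).card := by
    intro p
    rw [List.countP_eq_length_filter, ← List.toFinset_card_of_nodup (hnd.filter p),
      List.toFinset_filter]
  rw [← List.sum_toFinset _ hnd, ← List.sum_toFinset _ hnd]
  simp only [hfilt, hcnt]
  rw [Finset.sum_sub_distrib]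
  have hrhs : ∀ s ∈ D.toFinset,
      (1 - ((D.toFinset.filter
          (fun k => (k != s && PySem.Int.mod k s == 0) = true)).card : Int)) * T s
      = T s - ((D.toFinset.filter
          (fun k => (k != s && PySem.Int.mod k s == 0) = true)).card : Int) * T s := by
    intro s _; ring
  rw [Finset.sum_congr rfl hrhs, Finset.sum_sub_distrib]
  congr 1
  -- the double-counting swap
  calc ∑ s ∈ D.toFinset, ∑ k ∈ D.toFinset.filter
        (fun k => decide (PySem.Int.mod s k = 0 ∧ k < s) = true), T k
      = ∑ s ∈ D.toFinset, ∑ k ∈ D.toFinset,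
          if decide (PySem.Int.mod s k = 0 ∧ k < s) = true then T k else 0 := by
        apply Finset.sum_congr rfl; intro s _; rw [Finset.sum_filter]
    _ = ∑ k ∈ D.toFinset, ∑ s ∈ D.toFinset,
          if decide (PySem.Int.mod s k = 0 ∧ k < s) = true then T k else 0 :=
        Finset.sum_comm
    _ = ∑ k ∈ D.toFinset, ((D.toFinset.filter
          (fun s => decide (PySem.Int.mod s k = 0 ∧ k < s) = true)).card : Int) * T k := by
        apply Finset.sum_congr rfl; intro k _
        rw [← Finset.sum_filter, Finset.sum_const, nsmul_eq_mul]
    _ = ∑ k ∈ D.toFinset, ((D.toFinset.filter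
          (fun m => (m != k && PySem.Int.mod m k == 0) = true)).card : Int) * T k := by
        apply Finset.sum_congr rfl; intro k hk
        have hk1 : 1 ≤ k := hposF k hk
        have hset : D.toFinset.filter (fun s => decide (PySem.Int.mod s k = 0 ∧ k < s) = true)
            = D.toFinset.filter (fun m => (m != k && PySem.Int.mod m k == 0) = true) := by
          apply Finset.filter_congr
          intro m hm
          have hm1 : 1 ≤ m := hposF m hm
          simp only [decide_eq_true_eq, Bool.and_eq_true, bne_iff_ne, beq_iff_eq]
          constructor
          · rintro ⟨hdv, hlt⟩; exact ⟨by omega, hdv⟩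
          · rintro ⟨hne, hdv⟩
            refine ⟨hdv, ?_⟩
            have hkm : k ∣ m := (PySem.Int.mod_eq_zero_iff_dvd m k).mp hdv
            have := Int.le_of_dvd (by omega) hkm
            omega
        rw [hset]

-- evaluating A for sz ≥ 2
theorem A_eval (sz l r : Int) :
    get sz l r = retSum (tmpA sz l r) []
      ((PySem.List.pyRange 1 (PySem.Int.floordiv sz 2 + 1) 1).filter
        (fun d => PySem.Int.mod sz d == 0)) := by
  have hguard : ∀ (st : PySem.Dict Int Int × Int) (x : Int), x ∈ PySem.List.pyRange 1 (PySem.Int.floordiv sz 2 + 1) 1 →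
      bodyA sz l r st x
        = if PySem.Int.mod sz x == 0 then bodyA sz l r st x else st := by
    intro st x _
    by_cases h : PySem.Int.mod sz x = 0
    · simp [h]
    · simp [h, bodyA]
  show ((PySem.List.pyRange 1 (PySem.Int.floordiv sz 2 + 1) 1).foldl (bodyA sz l r)
    (PySem.Dict.empty, 0)).2 = _
  have h1 : (PySem.List.pyRange 1 (PySem.Int.floordiv sz 2 + 1) 1).foldl (bodyA sz l r)
        (PySem.Dict.empty, 0)
      = (PySem.List.pyRange 1 (PySem.Int.floordiv sz 2 + 1) 1).foldl
        (fun st x => if PySem.Int.mod sz x == 0 then bodyA sz l r st x else st)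
        (PySem.Dict.empty, 0) := PySem.List.foldl_congr_mem _ _ _ _ hguard
  rw [h1, PySem.List.foldl_if_eq_foldl_filter]
  have hnd : ((PySem.List.pyRange 1 (PySem.Int.floordiv sz 2 + 1) 1).filter
      (fun d => PySem.Int.mod sz d == 0)).Nodup :=
    ((PySem.List.pairwise_lt_pyRange_one _ _).filter _).imp (fun h => ne_of_lt h)
  have := loopA sz l r ((PySem.List.pyRange 1 (PySem.Int.floordiv sz 2 + 1) 1).filter
      (fun d => PySem.Int.mod sz d == 0)) [] 0 (by simpa using hnd)
    (fun x hx => by simpa using (List.of_mem_filter hx))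
  simpa using this

-- evaluating B for sz ≥ 2
theorem B_eval (sz l r : Int) (hsz : 2 ≤ sz) :
    get_alt sz l r
      = (((PySem.List.pyRange 1 (PySem.Int.floordiv sz 2 + 1) 1).filter
            (fun d => PySem.Int.mod sz d == 0)).map (fun s =>
          (1 - (((PySem.List.pyRange 1 (PySem.Int.floordiv sz 2 + 1) 1).filter
            (fun d => PySem.Int.mod sz d == 0)).countP
              (fun m => m != s && PySem.Int.mod m s == 0) : Int))
            * tmpB (10 ^ sz.toNat - 1) l r s)).sum := by
  show (if sz < 2 then 0 else _) = _
  rw [if_neg (by omega)]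
  rw [PySem.List.foldl_add]
  simp

-- the two tmp computations agree on actual divisors
theorem tmp_agree (sz l r s : Int) (hsz : 2 ≤ sz) (h1 : 1 ≤ s)
    (hmod : PySem.Int.mod sz s = 0) :
    tmpA sz l r s = tmpB (10 ^ sz.toNat - 1) l r s := by
  have hfac := facA_closed sz s h1 hsz hmod
  simp only [tmpA, tmpB, hfac]

-- ===== VERDICT (by name: the statement is the Claim_ definition above) =====
theorem get_spec : Claim_equal_get := by
  unfold Claim_equal_get Spec_get
  intro sz l r _
  by_cases hsz : sz < 2
  · rw [get_trivial_of_lt_two sz l r hsz]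
    show (0 : Int) = if sz < 2 then 0 else _
    rw [if_pos hsz]
  · push_neg at hsz
    rw [A_eval sz l r, B_eval sz l r hsz]
    have hpw : ((PySem.List.pyRange 1 (PySem.Int.floordiv sz 2 + 1) 1).filter
        (fun d => PySem.Int.mod sz d == 0)).Pairwise (· < ·) :=
      (PySem.List.pairwise_lt_pyRange_one _ _).filter _
    have hpos : ∀ x ∈ (PySem.List.pyRange 1 (PySem.Int.floordiv sz 2 + 1) 1).filter
        (fun d => PySem.Int.mod sz d == 0), 1 ≤ x := by
      intro x hx
      have := (PySem.List.mem_pyRange_one).mp (List.mem_of_mem_filter hx)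
      omega
    rw [retSum_closed _ _ [] (by simpa using hpw)]
    simp only [List.nil_append]
    rw [sum_swap_list _ _ hpw hpos]
    apply congrArg List.sum
    apply List.map_congr_left
    intro s hs
    have hmod : PySem.Int.mod sz s = 0 := by simpa using List.of_mem_filter hs
    rw [tmp_agree sz l r s hsz (hpos s hs) hmod]
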